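-- pv_equiv track=rewrite | github.com/TheArchbishopOfDjentinbury/Baernstormers | data-extraction/gftin-update/enrich_gtin_from_migipedia_pref76_fixsubject.py | gs1_ok
-- ===== SOURCE A (Python) =====
-- def gs1_ok(code: str) -> bool:
--     if not code or not code.isdigit() or len(code) not in (8,12,13,14):
--         return False
--     ds = [int(c) for c in code]; chk = ds[-1]; body = ds[:-1]
--     s = 0
--     for i, d in enumerate(reversed(body)):
--         s += d * (3 if i % 2 == 0 else 1)
--     return (10 - (s % 10)) % 10 == chk
-- ===== SOURCE B (Python) =====
-- def gs1_ok(code: str) -> bool: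
--     if not (code.isdigit() and len(code) in (8, 12, 13, 14)):
--         return False
--     digits = list(map(int, code))
--     # 3*d == d + 2*d, so the GS1 weighted sum is the plain digit sum plus
--     # twice the digits at the weight-3 positions: the slice code[-2::-2].
--     return (sum(digits) + 2 * sum(digits[-2::-2])) % 10 == 0
-- ===== Notes on version B (the rewrite author's own statement) =====
-- stated objective: alternative
-- what changed: Replaces A's reversed enumerate loop with alternating 3/1 weights and expected-check-digit comparison (10 - s%10)%10 == chk by two plain digit sums - the sum of all digits plus twice the sum of the slice code[-2::-2] (the weight-3 positions), using 3*d = d + 2*d - tested for zero residue mod 10.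
import Mathlib
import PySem

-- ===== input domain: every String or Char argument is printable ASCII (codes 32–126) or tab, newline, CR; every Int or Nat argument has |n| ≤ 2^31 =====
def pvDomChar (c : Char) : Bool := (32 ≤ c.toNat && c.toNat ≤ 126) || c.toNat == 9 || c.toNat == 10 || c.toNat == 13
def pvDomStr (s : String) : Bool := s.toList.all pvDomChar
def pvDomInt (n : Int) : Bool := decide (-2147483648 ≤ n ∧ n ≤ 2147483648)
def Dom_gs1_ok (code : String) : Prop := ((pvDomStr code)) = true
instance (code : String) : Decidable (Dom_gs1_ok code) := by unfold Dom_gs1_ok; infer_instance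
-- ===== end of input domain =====

-- B replaces A's reversed enumerate loop with alternating 3/1 weights by two plain digit
-- sums (all digits, plus twice the digits of the slice code[-2::-2]), using 3*d = d + 2*d.

-- ===== PORT A =====
-- int(c) for a single character (A's guard guarantees a digit, so the default is never used)
def pvDigit (c : Char) : Int := (PySem.Int.ofChars? [c]).getD 0

def gs1_ok (code : String) : Bool :=
  if code.toList.isEmpty || !(PySem.Str.strIsdigit code)
     || !(PySem.Str.len code == 8 || PySem.Str.len code == 12
          || PySem.Str.len code == 13 || PySem.Str.len code == 14) then
    false
  else
    let ds := code.toList.map pvDigit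
    let chk := PySem.List.pyGetD ds (-1) 0
    let body := PySem.List.slice ds none (some (-1))
    let s := (PySem.List.enumerate body.reverse 0).foldl
      (fun s p => s + p.2 * (if PySem.Int.mod p.1 2 == 0 then 3 else 1)) 0
    PySem.Int.mod (10 - PySem.Int.mod s 10) 10 == chk

-- ===== PORT B =====
def gs1_ok_alt (code : String) : Bool :=
  if !(PySem.Str.strIsdigit code
       && (PySem.Str.len code == 8 || PySem.Str.len code == 12
           || PySem.Str.len code == 13 || PySem.Str.len code == 14)) then
    false
  else
    let digits := code.toList.map pvDigit
    -- digits[-2::-2]; the step -2 is nonzero, so slice? never returns none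
    let heavy := (PySem.List.slice? digits (some (-2)) none (-2)).getD []
    PySem.Int.mod (digits.sum + 2 * heavy.sum) 10 == 0

-- ===== PRECONDITION & SPEC =====
def Spec_gs1_ok (code : String) (out : Bool) : Prop := out = gs1_ok_alt code
instance (code : String) (out : Bool) : Decidable (Spec_gs1_ok code out) := by unfold Spec_gs1_ok; infer_instance

-- ===== CLAIM (what is proved, stated in full; the proofs are below) =====
def Claim_equal_gs1_ok : Prop := ∀ (code : String), Dom_gs1_ok code → Spec_gs1_ok code (gs1_ok code)

-- ===== LEMMAS AND PROOFS =====

-- a digit character's int() value is between 0 and 9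
lemma pvDigit_bounds (c : Char) (h : PySem.Chars.isdigit c = true) :
    0 ≤ pvDigit c ∧ pvDigit c ≤ 9 := by
  unfold pvDigit
  simp only [PySem.Chars.isdigit, Bool.and_eq_true, decide_eq_true_eq] at h
  have h1 : 48 ≤ c.toNat := h.1
  have h2 : c.toNat ≤ 57 := h.2
  have hc : c = Char.ofNat c.toNat := (Char.ofNat_toNat c).symm
  interval_cases hn : c.toNat <;> rw [hc] <;> decide

-- the two guarded bodies agree on every all-digit list of length 8, 12, 13 or 14:
-- A's expected-check-digit comparison equals B's two-sums zero-residue test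
lemma pvCore (l : List Char) (hd : ∀ c ∈ l, PySem.Chars.isdigit c = true)
    (hl : l.length = 8 ∨ l.length = 12 ∨ l.length = 13 ∨ l.length = 14) :
    (PySem.Int.mod (10 - PySem.Int.mod ((PySem.List.enumerate (PySem.List.slice (l.map pvDigit) none (some (-1))).reverse 0).foldl (fun s p => s + p.2 * (if PySem.Int.mod p.1 2 == 0 then 3 else 1)) 0) 10) 10 == PySem.List.pyGetD (l.map pvDigit) (-1) 0)
    = (PySem.Int.mod ((l.map pvDigit).sum + 2 * ((PySem.List.slice? (l.map pvDigit) (some (-2)) none (-2)).getD []).sum) 10 == 0) := by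
  rcases l with _ | ⟨c0, l⟩
  · exact absurd hl (by simp)
  rcases l with _ | ⟨c1, l⟩
  · exact absurd hl (by simp)
  rcases l with _ | ⟨c2, l⟩
  · exact absurd hl (by simp)
  rcases l with _ | ⟨c3, l⟩
  · exact absurd hl (by simp)
  rcases l with _ | ⟨c4, l⟩
  · exact absurd hl (by simp)
  rcases l with _ | ⟨c5, l⟩
  · exact absurd hl (by simp)
  rcases l with _ | ⟨c6, l⟩
  · exact absurd hl (by simp)
  rcases l with _ | ⟨c7, l⟩
  · exact absurd hl (by simp)
  rcases l with _ | ⟨c8, l⟩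
  · have hb := pvDigit_bounds c7 (hd c7 (by simp))
    simp [PySem.List.slice, PySem.List.slice?, PySem.List.sliceIndices, PySem.List.enumerate,
            PySem.List.pyGetD, PySem.List.pyGet?, PySem.List.pyIdx?, PySem.List.clampIdx,
            List.foldl, List.range_succ]
    omega
  rcases l with _ | ⟨c9, l⟩
  · exact absurd hl (by simp)
  rcases l with _ | ⟨c10, l⟩
  · exact absurd hl (by simp)
  rcases l with _ | ⟨c11, l⟩
  · exact absurd hl (by simp)
  rcases l with _ | ⟨c12, l⟩
  · have hb := pvDigit_bounds c11 (hd c11 (by simp))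
    simp [PySem.List.slice, PySem.List.slice?, PySem.List.sliceIndices, PySem.List.enumerate,
            PySem.List.pyGetD, PySem.List.pyGet?, PySem.List.pyIdx?, PySem.List.clampIdx,
            List.foldl, List.range_succ]
    omega
  rcases l with _ | ⟨c13, l⟩
  · have hb := pvDigit_bounds c12 (hd c12 (by simp))
    simp [PySem.List.slice, PySem.List.slice?, PySem.List.sliceIndices, PySem.List.enumerate,
            PySem.List.pyGetD, PySem.List.pyGet?, PySem.List.pyIdx?, PySem.List.clampIdx,
            List.foldl, List.range_succ]
    omega
  rcases l with _ | ⟨c14, l⟩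
  · have hb := pvDigit_bounds c13 (hd c13 (by simp))
    simp [PySem.List.slice, PySem.List.slice?, PySem.List.sliceIndices, PySem.List.enumerate,
            PySem.List.pyGetD, PySem.List.pyGet?, PySem.List.pyIdx?, PySem.List.clampIdx,
            List.foldl, List.range_succ]
    omega
  simp only [List.length_cons] at hl
  omega

-- ===== VERDICT (by name: the statement is the Claim_ definition above) =====
theorem gs1_ok_spec : Claim_equal_gs1_ok := by
  intro code _
  unfold Spec_gs1_ok gs1_ok gs1_ok_alt
  cases hsd : PySem.Str.strIsdigit code with
  | false =>
    have hsd2 : PySem.Chars.strIsdigit code.toList = false := by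
      rw [← PySem.Str.strIsdigit_eq]; exact hsd
    simp
  | true =>
    have hsd2 : PySem.Chars.strIsdigit code.toList = true := by
      rw [← PySem.Str.strIsdigit_eq]; exact hsd
    have hdig := hsd2
    rw [PySem.Chars.strIsdigit] at hdig
    simp only [Bool.and_eq_true, Bool.not_eq_eq_eq_not, Bool.not_true,
      List.isEmpty_eq_false_iff, List.all_eq_true] at hdig
    have hie : code.toList.isEmpty = false := by simp [hdig.1]
    by_cases hlenP : code.length = 8 ∨ code.length = 12 ∨ code.length = 13 ∨ code.length = 14
    · rw [if_neg (by simp [PySem.Str.len_eq, hie]; omega),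
         if_neg (by simp [PySem.Str.len_eq]; omega)]
      have hl : code.toList.length = 8 ∨ code.toList.length = 12
          ∨ code.toList.length = 13 ∨ code.toList.length = 14 := by
        rw [String.length_toList]; exact hlenP
      exact pvCore code.toList (fun c hc => hdig.2 c hc) hl
    · rw [if_pos (by simp [PySem.Str.len_eq, hie]; omega),
         if_pos (by simp [PySem.Str.len_eq]; omega)]
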